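-- pv_equiv track=rewrite | github.com/JoserraLP/temporal-series-clustering | temporal_series_clustering/cluster/graph_utils.py | get_conflicting_clusters
-- ===== SOURCE A (Python) =====
-- def get_conflicting_clusters(cycles):
--     # Create a set to store elements that appear in more than one list
--     conflicting_nodes = set()
--
--     # Create a set to store elements that have been seen
--     seen_nodes = set()
--
--     # Retrieve conflicting nodes
--     # Iterate over each list and each node in the list
--     for _, cycle in cycles:
--         for node in cycle:
--             # If the node has been seen before, add it to the conflicting nodes set
--             if node in seen_nodes:
--                 conflicting_nodes.add(node)
--             # Otherwise, add it to the seen nodes set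
--             else:
--                 seen_nodes.add(node)
--
--     # Initialize an empty dictionary to store the results
--     conflicting_clusters = {}
--     # Iterate over each cycle in the list of cycles
--     for _, cycle in cycles:
--         # Iterate over the nodes of a cycle
--         for node in cycle:
--             # If node is conflicting
--             if node in conflicting_nodes:
--                 # If not stored previously
--                 if node not in conflicting_clusters:
--                     # Create a list
--                     conflicting_clusters[node] = []
--                 # Append to list
--                 conflicting_clusters[node].append(cycle)
--
--     return conflicting_clusters
-- ===== SOURCE B (Python) =====
-- def get_conflicting_clusters(cycles):
--     # Index every node to the list of cycles containing it (one append per occurrence)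
--     index = {}
--     for _, cycle in cycles:
--         for node in cycle:
--             index.setdefault(node, []).append(cycle)
--     # Keep only nodes that occur more than once
--     return {node: cls for node, cls in index.items() if len(cls) > 1}
-- ===== Notes on version B (the rewrite author's own statement) =====
-- stated objective: simpler
-- what changed: Replaces A's two full passes over cycles (a seen/conflicting set pass, then a guarded dict-building pass) with a single indexing pass building node->cycles, followed by a length-based filter of that dict.
import Mathlib
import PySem

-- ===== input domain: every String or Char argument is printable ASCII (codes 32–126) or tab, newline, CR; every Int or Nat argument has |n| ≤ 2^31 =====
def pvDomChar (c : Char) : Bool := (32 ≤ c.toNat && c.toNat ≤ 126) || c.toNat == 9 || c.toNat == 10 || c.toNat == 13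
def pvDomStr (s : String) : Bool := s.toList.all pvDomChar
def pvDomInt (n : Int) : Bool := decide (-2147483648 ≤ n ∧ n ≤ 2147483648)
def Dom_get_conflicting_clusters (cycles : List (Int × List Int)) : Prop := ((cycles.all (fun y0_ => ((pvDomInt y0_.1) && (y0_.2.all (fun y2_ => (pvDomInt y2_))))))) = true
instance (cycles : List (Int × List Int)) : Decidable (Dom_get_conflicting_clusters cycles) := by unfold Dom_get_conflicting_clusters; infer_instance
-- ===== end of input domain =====

-- B replaces A's two passes (seen/conflicting sets, then a guarded dict build) by one
-- node→cycles indexing pass plus a length filter; objective: simpler.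

-- ===== PORT A =====
def get_conflicting_clusters (cycles : List (Int × List Int)) : List (Int × List (List Int)) :=
  -- first pass: (conflicting_nodes, seen_nodes)
  let st := cycles.foldl (fun (st : PySem.Set Int × PySem.Set Int) pc =>
    pc.2.foldl (fun st node =>
      if PySem.Set.contains st.2 node then (PySem.Set.add st.1 node, st.2)
      else (st.1, PySem.Set.add st.2 node)) st) ([], [])
  let conflicting := st.1
  -- second pass: build the dict ('if absent insert []; append' = modify with default [])
  let d := cycles.foldl (fun (d : PySem.Dict Int (List (List Int))) pc =>
    pc.2.foldl (fun d node =>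
      if PySem.Set.contains conflicting node then d.modify node [] (· ++ [pc.2])
      else d) d) PySem.Dict.empty
  d.items

-- ===== PORT B =====
def get_conflicting_clusters_alt (cycles : List (Int × List Int)) : List (Int × List (List Int)) :=
  -- single indexing pass ('setdefault(node, []).append(cycle)' = modify with default [])
  let index := cycles.foldl (fun (d : PySem.Dict Int (List (List Int))) pc =>
    pc.2.foldl (fun d node => d.modify node [] (· ++ [pc.2])) d) PySem.Dict.empty
  index.items.filter (fun p => p.2.length > 1)

-- ===== PRECONDITION & SPEC =====
def Spec_get_conflicting_clusters (cycles : List (Int × List Int)) (out : List (Int × List (List Int))) : Prop := out = get_conflicting_clusters_alt cycles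
instance (cycles : List (Int × List Int)) (out : List (Int × List (List Int))) : Decidable (Spec_get_conflicting_clusters cycles out) := by unfold Spec_get_conflicting_clusters; infer_instance

-- ===== CLAIM (what is proved, stated in full; the proofs are below) =====
def Claim_equal_get_conflicting_clusters : Prop := ∀ (cycles : List (Int × List Int)), Dom_get_conflicting_clusters cycles → Spec_get_conflicting_clusters cycles (get_conflicting_clusters cycles)


-- ===== LEMMAS AND PROOFS =====

-- the list of (node, cycle) occurrences both programs iterate over
def pvOcc (cycles : List (Int × List Int)) : List (Int × List Int) :=
  cycles.flatMap (fun pc => pc.2.map (fun n => (n, pc.2)))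

-- the flattened node stream
def pvNodes (cycles : List (Int × List Int)) : List Int :=
  (pvOcc cycles).map (fun p => p.1)

-- one step of A's first pass on the state (conflicting_nodes, seen_nodes)
def pvStep (st : PySem.Set Int × PySem.Set Int) (node : Int) : PySem.Set Int × PySem.Set Int :=
  if PySem.Set.contains st.2 node then (PySem.Set.add st.1 node, st.2)
  else (st.1, PySem.Set.add st.2 node)

-- a double loop 'for _, cycle in cycles: for node in cycle' is a fold over pvOcc
theorem pv_foldl_occ {b : Type} (cycles : List (Int × List Int)) (f : b -> Int × List Int -> b) (init : b) :
    cycles.foldl (fun acc pc => pc.2.foldl (fun a n => f a (n, pc.2)) acc) init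
      = (pvOcc cycles).foldl f init := by
  induction cycles generalizing init with
  | nil => rfl
  | cons pc rest ih => simp [pvOcc, List.foldl_append, List.foldl_map, ih]

-- membership invariant of A's first pass
theorem pv_pass1_inv (l : List Int) (c s : PySem.Set Int) :
    (∀ n, n ∈ (l.foldl pvStep (c, s)).2 ↔ n ∈ s ∨ n ∈ l) ∧
    (∀ n, n ∈ (l.foldl pvStep (c, s)).1 ↔ n ∈ c ∨ (n ∈ l ∧ (n ∈ s ∨ 2 ≤ l.count n))) := by
  induction l generalizing c s with
  | nil => simp
  | cons x xs ih =>
    rw [List.foldl_cons]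
    by_cases hx : x ∈ s
    · rw [show pvStep (c, s) x = (PySem.Set.add c x, s) from by
        unfold pvStep; rw [if_pos ((PySem.Set.contains_iff s x).mpr hx)]]
      refine ⟨fun n => ?_, fun n => ?_⟩
      · rw [(ih (PySem.Set.add c x) s).1]
        by_cases hnx : n = x <;> simp [hnx, hx]
      · rw [(ih (PySem.Set.add c x) s).2, PySem.Set.mem_add]
        by_cases hnx : n = x
        · subst hnx; simp [hx]
        · simp [hnx, Ne.symm hnx]
    · rw [show pvStep (c, s) x = (c, PySem.Set.add s x) from by
        unfold pvStep; rw [if_neg (fun h => hx ((PySem.Set.contains_iff s x).mp h))]]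
      refine ⟨fun n => ?_, fun n => ?_⟩
      · rw [(ih c (PySem.Set.add s x)).1, PySem.Set.mem_add]
        by_cases hnx : n = x <;> simp [hnx]
      · rw [(ih c (PySem.Set.add s x)).2, PySem.Set.mem_add]
        by_cases hnx : n = x
        · subst hnx
          have hcnt : (2 ≤ xs.count n + 1) ↔ n ∈ xs := by
            rw [← List.count_pos_iff]; omega
          simp [hx, hcnt]
        · simp [hnx, Ne.symm hnx]
-- the items of a grouping modify-fold over a pair list
theorem pv_items_modfold (L : List (Int × List Int)) :
    (L.foldl (fun d p => d.modify p.1 [] (· ++ [p.2]))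
        (PySem.Dict.empty : PySem.Dict Int (List (List Int)))).items
      = (PySem.Set.ofList (L.map (fun p => p.1))).map
          (fun n => (n, (L.filter (fun p => p.1 == n)).map (fun p => p.2))) := by
  have hnd : ((L.foldl (fun d p => d.modify p.1 [] (· ++ [p.2]))
      (PySem.Dict.empty : PySem.Dict Int (List (List Int)))).keys).Nodup :=
    PySem.Dict.nodup_keys_foldl_modify_key L (fun p => p.1) [] (fun _ p v => v ++ [p.2])
      PySem.Dict.empty (by simp)
  rw [PySem.Dict.items_eq_map_keys _ hnd []]
  have hkeys : (L.foldl (fun d p => d.modify p.1 [] (· ++ [p.2]))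
      (PySem.Dict.empty : PySem.Dict Int (List (List Int)))).keys
        = PySem.Set.ofList (L.map (fun p => p.1)) := by
    have := PySem.Dict.keys_foldl_modify_key L (fun p => p.1) [] (fun _ p v => v ++ [p.2])
      (PySem.Dict.empty : PySem.Dict Int (List (List Int)))
    simpa [PySem.Set.update_empty] using this
  rw [hkeys]
  refine List.map_congr_left (fun n _ => ?_)
  have := PySem.Dict.getD_foldl_modify_append L
    (PySem.Dict.empty : PySem.Dict Int (List (List Int))) n
  simp at this
  simp [this]

-- ofList commutes with filter
theorem pv_ofList_filter (p : Int -> Bool) (l : List Int) :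
    PySem.Set.ofList (l.filter p) = (PySem.Set.ofList l).filter p := by
  induction l using List.reverseRecOn with
  | nil => rfl
  | append_singleton xs x ih =>
    rw [List.filter_append, PySem.Set.ofList_append_singleton, PySem.Set.add_eq_ite]
    by_cases hp : p x
    · rw [show List.filter p [x] = [x] from by simp [hp],
        PySem.Set.ofList_append_singleton, PySem.Set.add_eq_ite, ih]
      by_cases hm : x ∈ PySem.Set.ofList xs
      · rw [if_pos hm, if_pos (List.mem_filter.mpr ⟨hm, hp⟩)]
      · rw [if_neg hm, if_neg (fun h => hm (List.mem_filter.mp h).1), List.filter_append]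
        simp [hp]
    · rw [show List.filter p [x] = [] from by simp [hp], List.append_nil, ih]
      by_cases hm : x ∈ PySem.Set.ofList xs
      · rw [if_pos hm]
      · rw [if_neg hm, List.filter_append]
        simp [hp]

-- guarded double loop = unguarded fold over the filtered occurrences
theorem pv_guarded (cycles : List (Int × List Int)) (C : PySem.Set Int) :
    cycles.foldl (fun d pc => pc.2.foldl
        (fun d node => if PySem.Set.contains C node then d.modify node [] (· ++ [pc.2]) else d) d)
      (PySem.Dict.empty : PySem.Dict Int (List (List Int)))
    = ((pvOcc cycles).filter (fun p => PySem.Set.contains C p.1)).foldl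
        (fun d p => d.modify p.1 [] (· ++ [p.2])) PySem.Dict.empty := by
  rw [List.foldl_filter]
  exact pv_foldl_occ (b := PySem.Dict Int (List (List Int))) cycles
    (fun d p => if PySem.Set.contains C p.1 then d.modify p.1 [] (· ++ [p.2]) else d)
    PySem.Dict.empty

-- characterisation of A's conflicting set
theorem pv_conf_mem (cycles : List (Int × List Int)) (n : Int) :
    n ∈ ((pvNodes cycles).foldl pvStep (([], []) : PySem.Set Int × PySem.Set Int)).1
      ↔ 2 ≤ (pvNodes cycles).count n := by
  rw [(pv_pass1_inv (pvNodes cycles) [] []).2 n]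
  have : 2 ≤ (pvNodes cycles).count n → n ∈ pvNodes cycles := by
    intro h; rw [← List.count_pos_iff]; omega
  simp; tauto


-- the remaining list algebra: A's filtered grouping = B's grouping filtered by length
theorem pv_final (Occ : List (Int × List Int)) (C : PySem.Set Int)
    (hC : ∀ n, n ∈ C ↔ 2 ≤ (Occ.map (fun p => p.1)).count n) :
    (PySem.Set.ofList ((Occ.filter (fun p => PySem.Set.contains C p.1)).map (fun p => p.1))).map
      (fun n => (n, ((Occ.filter (fun p => PySem.Set.contains C p.1)).filter
          (fun p => p.1 == n)).map (fun p => p.2)))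
    = ((PySem.Set.ofList (Occ.map (fun p => p.1))).map
        (fun n => (n, (Occ.filter (fun p => p.1 == n)).map (fun p => p.2)))).filter
        (fun p => decide (p.2.length > 1)) := by
  have hlen : ∀ n : Int, (Occ.filter (fun p => p.1 == n)).length
      = (Occ.map (fun p => p.1)).count n := by
    intro n
    simp [List.count_eq_countP, List.countP_map]
    rw [List.countP_eq_length_filter]; rfl
  have hmf : (Occ.filter (fun p => PySem.Set.contains C p.1)).map (fun p => p.1)
      = (Occ.map (fun p => p.1)).filter (fun n => PySem.Set.contains C n) :=
    (List.filter_map).symm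
  rw [hmf, pv_ofList_filter, List.filter_map]
  have hfil : (PySem.Set.ofList (Occ.map (fun p => p.1))).filter
        (fun n => PySem.Set.contains C n)
      = (PySem.Set.ofList (Occ.map (fun p => p.1))).filter
        ((fun p : Int × List (List Int) => decide (p.2.length > 1)) ∘
          (fun n => (n, (Occ.filter (fun p => p.1 == n)).map (fun p => p.2)))) := by
    refine List.filter_congr (fun n _ => ?_)
    simp only [Function.comp, List.length_map, hlen]
    by_cases h : n ∈ C
    · rw [(PySem.Set.contains_iff C n).mpr h, eq_comm, decide_eq_true_eq]
      have := (hC n).mp h; omega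
    · rw [eq_comm]
      have h1 : PySem.Set.contains C n = false := by
        rcases Bool.eq_false_or_eq_true (PySem.Set.contains C n) with hb | hb
        · exact absurd ((PySem.Set.contains_iff C n).mp hb) h
        · exact hb
      rw [h1, decide_eq_false_iff_not]
      intro hgt; exact h ((hC n).mpr (by omega))
  rw [hfil]
  refine List.map_congr_left (fun n hn => ?_)
  have hmem : PySem.Set.contains C n = true := by
    rcases List.mem_filter.mp hn with ⟨-, hb⟩
    simp only [Function.comp, decide_eq_true_eq, List.length_map, hlen] at hb
    exact (PySem.Set.contains_iff C n).mpr ((hC n).mpr (by omega))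
  have hff : (Occ.filter (fun p => PySem.Set.contains C p.1)).filter (fun p => p.1 == n)
      = Occ.filter (fun p => p.1 == n) := by
    rw [List.filter_filter]
    refine List.filter_congr (fun a _ => ?_)
    by_cases ha : a.1 = n
    · simp [ha]
      exact (PySem.Set.contains_iff C n).mp hmem
    · simp [ha]
  rw [hff]

theorem pv_main (cycles : List (Int × List Int)) :
    get_conflicting_clusters cycles = get_conflicting_clusters_alt cycles := by
  unfold get_conflicting_clusters get_conflicting_clusters_alt
  -- name A's first pass as a fold over pvNodes
  have h1 : (cycles.foldl (fun (st : PySem.Set Int × PySem.Set Int) pc =>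
      pc.2.foldl (fun st node =>
        if PySem.Set.contains st.2 node then (PySem.Set.add st.1 node, st.2)
        else (st.1, PySem.Set.add st.2 node)) st) ([], []))
      = (pvNodes cycles).foldl pvStep ([], []) := by
    rw [pvNodes, List.foldl_map]
    exact pv_foldl_occ cycles (fun st p => pvStep st p.1) _
  -- B's index as a fold over pvOcc
  have h2 : (cycles.foldl (fun (d : PySem.Dict Int (List (List Int))) pc =>
      pc.2.foldl (fun d node => d.modify node [] (· ++ [pc.2])) d) PySem.Dict.empty)
      = (pvOcc cycles).foldl (fun d p => d.modify p.1 [] (· ++ [p.2])) PySem.Dict.empty :=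
    pv_foldl_occ (b := PySem.Dict Int (List (List Int))) cycles
      (fun d p => d.modify p.1 [] (· ++ [p.2])) PySem.Dict.empty
  simp only [h1, h2, pv_guarded, pv_items_modfold]
  exact pv_final (pvOcc cycles) _ (fun n => by
    simpa [pvNodes] using pv_conf_mem cycles n)

-- ===== VERDICT (by name: the statement is the Claim_ definition above) =====
theorem get_conflicting_clusters_spec : Claim_equal_get_conflicting_clusters := by
  intro cycles _
  unfold Spec_get_conflicting_clusters
  exact pv_main cycles
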